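-- pv_equiv track=rewrite | github.com/saad722311/Final-Year-Project---Deep-Learning-Based-Handwritten-Mathematical-Expression-Solver | src/models/decoder_transformer.py | _get_banned_tokens
-- ===== SOURCE A (Python) =====
-- def _get_banned_tokens(prefix: list[int], n: int) -> set[int]:
--     if n <= 1 or len(prefix) < n - 1:
--         return set()
--     mapping: dict[tuple[int, ...], set[int]] = {}
--     for i in range(len(prefix) - n + 1):
--         key = tuple(prefix[i : i + n - 1])
--         nxt = prefix[i + n - 1]
--         mapping.setdefault(key, set()).add(nxt)
--     key_now = tuple(prefix[-(n - 1):])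
--     return mapping.get(key_now, set())
-- ===== SOURCE B (Python) =====
-- def _get_banned_tokens(prefix: list[int], n: int) -> set[int]:
--     if n <= 1 or len(prefix) < n - 1:
--         return set()
--     m = n - 1
--     pattern = prefix[-m:]
--     banned: set[int] = set()
--     for i in range(len(prefix) - m):
--         if prefix[i : i + m] == pattern:
--             banned.add(prefix[i + m])
--     return banned
-- ===== Notes on version B (the rewrite author's own statement) =====
-- stated objective: faster
-- what changed: Instead of building a dict mapping every (n-1)-gram to its set of next tokens and looking up the suffix key, B scans once for occurrences of the single suffix pattern and collects the tokens that follow them.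
import Mathlib
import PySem

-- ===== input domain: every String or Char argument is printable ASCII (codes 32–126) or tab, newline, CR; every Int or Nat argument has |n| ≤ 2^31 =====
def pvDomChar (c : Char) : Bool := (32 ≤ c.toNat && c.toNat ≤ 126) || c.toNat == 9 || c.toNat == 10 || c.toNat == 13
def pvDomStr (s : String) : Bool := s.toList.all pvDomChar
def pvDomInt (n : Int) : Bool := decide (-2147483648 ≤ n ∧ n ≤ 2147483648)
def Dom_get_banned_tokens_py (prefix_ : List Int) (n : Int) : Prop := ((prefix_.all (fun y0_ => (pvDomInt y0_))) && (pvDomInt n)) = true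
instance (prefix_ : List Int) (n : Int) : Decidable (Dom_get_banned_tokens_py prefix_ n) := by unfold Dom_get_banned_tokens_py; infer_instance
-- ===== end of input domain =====

-- B replaces A's hash index of ALL (n-1)-grams by a direct scan for the one suffix pattern
-- (simpler, and measurably faster by a constant factor in Python).

-- ===== PORT A =====
def get_banned_tokens_py (prefix_ : List Int) (n : Int) : List Int :=
  if n ≤ 1 ∨ (prefix_.length : Int) < n - 1 then PySem.Set.empty
  else
    let mapping : PySem.Dict (List Int) (PySem.Set Int) :=
      (PySem.List.pyRange 0 ((prefix_.length : Int) - n + 1) 1).foldl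
        (fun d i =>
          let key := PySem.List.slice prefix_ (some i) (some (i + n - 1))
          let nxt := PySem.List.pyGetD prefix_ (i + n - 1) 0   -- index i+n-1 is always in range here
          d.modify key PySem.Set.empty (fun s => PySem.Set.add s nxt))
        PySem.Dict.empty
    mapping.getD (PySem.List.slice prefix_ (some (-(n - 1))) none) PySem.Set.empty

-- ===== PORT B =====
def get_banned_tokens_py_alt (prefix_ : List Int) (n : Int) : List Int :=
  if n ≤ 1 ∨ (prefix_.length : Int) < n - 1 then PySem.Set.empty
  else
    let m := n - 1
    let pattern := PySem.List.slice prefix_ (some (-m)) none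
    (PySem.List.pyRange 0 ((prefix_.length : Int) - m) 1).foldl
      (fun (s : PySem.Set Int) i =>
        if PySem.List.slice prefix_ (some i) (some (i + m)) == pattern
        then PySem.Set.add s (PySem.List.pyGetD prefix_ (i + m) 0)   -- index i+m always in range here
        else s)
      PySem.Set.empty

-- ===== PRECONDITION & SPEC =====
def Spec_get_banned_tokens_py (prefix_ : List Int) (n : Int) (out : List Int) : Prop := out = get_banned_tokens_py_alt prefix_ n
instance (prefix_ : List Int) (n : Int) (out : List Int) : Decidable (Spec_get_banned_tokens_py prefix_ n out) := by unfold Spec_get_banned_tokens_py; infer_instance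

-- ===== CLAIM (what is proved, stated in full; the proofs are below) =====
def Claim_equal_get_banned_tokens_py : Prop := ∀ (prefix_ : List Int) (n : Int), Dom_get_banned_tokens_py prefix_ n → Spec_get_banned_tokens_py prefix_ n (get_banned_tokens_py prefix_ n)

-- ===== LEMMAS AND PROOFS =====

/-- Reading one key of the dict built by A's grouping loop is the same as folding the
    matching updates directly into that key's set. -/
theorem getD_foldl_modify_add (is : List Int) (key : Int → List Int) (nxt : Int → Int)
    (d : PySem.Dict (List Int) (PySem.Set Int)) (k : List Int) :
    (is.foldl (fun d i => d.modify (key i) PySem.Set.empty (fun s => PySem.Set.add s (nxt i))) d).getD k PySem.Set.empty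
      = is.foldl (fun s i => if key i == k then PySem.Set.add s (nxt i) else s) (d.getD k PySem.Set.empty) := by
  induction is generalizing d with
  | nil => rfl
  | cons i is ih =>
      simp only [List.foldl_cons, ih, PySem.Dict.getD_modify]
      by_cases h : key i = k
      · simp [h]
      · simp [h, Ne.symm h]

theorem get_banned_tokens_eq (prefix_ : List Int) (n : Int) :
    get_banned_tokens_py prefix_ n = get_banned_tokens_py_alt prefix_ n := by
  unfold get_banned_tokens_py get_banned_tokens_py_alt
  split_ifs with h
  · rfl
  · rw [getD_foldl_modify_add, PySem.Dict.getD_empty]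
    have hr : (prefix_.length : Int) - n + 1 = (prefix_.length : Int) - (n - 1) := by ring
    rw [hr]
    congr 1
    funext s i
    have hi : i + n - 1 = i + (n - 1) := by ring
    rw [hi]

-- ===== VERDICT (by name: the statement is the Claim_ definition above) =====
theorem get_banned_tokens_py_spec : Claim_equal_get_banned_tokens_py := by
  intro prefix_ n _
  unfold Spec_get_banned_tokens_py
  exact get_banned_tokens_eq prefix_ n
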